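-- pv_equiv track=rewrite | github.com/eellak/glossAPI | src/glossapi/corpus/phase_clean.py | _is_small_parameterized_definition_family
-- ===== SOURCE A (Python) =====
-- from typing import Any, Dict, Iterable, List, Optional, Set, Tuple, Union
--
-- LATEX_SMALL_DEFINITION_FAMILY_MAX_RUN = 6
--
-- def _normalize_latex_segment_exact(text: str) -> str:
--     return "".join(ch.casefold() for ch in text if not ch.isspace())
--
-- def _extract_latex_lhs_key(raw_segment: str) -> Optional[str]:
--     normalized = _normalize_latex_segment_exact(raw_segment)
--     if "=" not in normalized:
--         return None
--     lhs = normalized.split("=", 1)[0]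
--     return lhs or None
--
-- def _is_small_parameterized_definition_family(run: List[Dict[str, Any]]) -> bool:
--     if len(run) > LATEX_SMALL_DEFINITION_FAMILY_MAX_RUN:
--         return False
--     lhs_keys = [_extract_latex_lhs_key(str(item["text"])) for item in run]
--     if any(key is None for key in lhs_keys):
--         return False
--     if any(
--         key is not None and any(token in key for token in (r"\frac", r"\sum", r"\prod", r"\int", "+", "-", "="))
--         for key in lhs_keys
--     ):
--         return False
--     return len(set(lhs_keys)) == len(lhs_keys)
-- ===== SOURCE B (Python) =====
-- from typing import Any, Dict, List, Optional
--
-- LATEX_SMALL_DEFINITION_FAMILY_MAX_RUN = 6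
--
-- _FORBIDDEN = (r"\frac", r"\sum", r"\prod", r"\int", "+", "-", "=")
--
-- def _lhs_key(text: str) -> Optional[str]:
--     # one character pass: drop whitespace, casefold, stop at the first '='
--     lhs = []
--     for ch in text:
--         if ch.isspace():
--             continue
--         folded = ch.casefold()
--         if folded == "=":
--             return "".join(lhs) or None
--         lhs.append(folded)
--     return None
--
-- def _is_small_parameterized_definition_family(run: List[Dict[str, Any]]) -> bool:
--     if len(run) > LATEX_SMALL_DEFINITION_FAMILY_MAX_RUN:
--         return False
--     keys = [_lhs_key(str(item["text"])) for item in run]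
--     if any(key is None or any(tok in key for tok in _FORBIDDEN) for key in keys):
--         return False
--     keys.sort()
--     return all(a < b for a, b in zip(keys, keys[1:]))
-- ===== Notes on version B (the rewrite author's own statement) =====
-- stated objective: alternative
-- what changed: B extracts each lhs key in a single character pass (skip whitespace, casefold, stop at the first '=') instead of normalizing the whole string and splitting, and decides key uniqueness by sorting the keys and checking that adjacent pairs are strictly increasing instead of comparing the size of a set.
import Mathlib
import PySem

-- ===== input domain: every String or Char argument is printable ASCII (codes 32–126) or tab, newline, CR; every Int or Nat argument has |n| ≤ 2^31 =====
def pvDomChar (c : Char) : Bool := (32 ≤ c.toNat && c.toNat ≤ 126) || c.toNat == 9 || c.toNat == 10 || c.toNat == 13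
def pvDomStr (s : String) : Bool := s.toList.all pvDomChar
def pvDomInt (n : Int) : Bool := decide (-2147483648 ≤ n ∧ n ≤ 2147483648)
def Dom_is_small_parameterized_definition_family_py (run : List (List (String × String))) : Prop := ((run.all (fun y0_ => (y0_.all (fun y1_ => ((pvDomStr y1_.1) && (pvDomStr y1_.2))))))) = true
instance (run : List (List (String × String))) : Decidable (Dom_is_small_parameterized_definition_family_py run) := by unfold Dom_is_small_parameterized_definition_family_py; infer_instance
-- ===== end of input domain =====

-- B extracts each lhs key in ONE character pass (skip spaces, casefold, stop at the first '=')
-- instead of normalize-whole-string-then-split, and decides uniqueness by sorting the keys and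
-- comparing adjacent pairs instead of a set-size comparison; same return value everywhere.
-- (objective: alternative algorithm, same practical cost)

-- ===== PORT A =====
-- A-side helpers: ports of _normalize_latex_segment_exact / _extract_latex_lhs_key.
-- ch.casefold() is ported as lowerChar: exact on the ASCII domain.
def pvNormalize (s : List Char) : List Char :=
  (s.filter (fun c => !PySem.Chars.isspace c)).map PySem.Chars.lowerChar

def pvExtract (s : String) : Option (List Char) :=
  let n := pvNormalize s.toList
  if PySem.Chars.isIn ['='] n then
    let lhs := n.takeWhile (fun c => c ≠ '=')   -- split("=", 1)[0]
    if lhs = [] then none else some lhs          -- "lhs or None"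
  else none

def pvTokens : List (List Char) :=
  ["\\frac".toList, "\\sum".toList, "\\prod".toList, "\\int".toList, "+".toList, "-".toList, "=".toList]

def pvForb (k : List Char) : Bool := pvTokens.any (fun t => PySem.Chars.isIn t k)

-- item["text"] raises KeyError when the key is missing: excluded by Pre_; getD is total stand-in there.
def pvKeys (run : List (List (String × String))) : List (Option (List Char)) :=
  run.map (fun item => pvExtract ((PySem.Dict.mk item).getD "text" ""))

def is_small_parameterized_definition_family_py (run : List (List (String × String))) : Bool :=
  if run.length > 6 then false
  else
    let lhs_keys := pvKeys run
    if lhs_keys.any (fun k => k.isNone) then false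
    else if lhs_keys.any (fun k => match k with | some s => pvForb s | none => false) then false
    else (PySem.Set.ofList lhs_keys).length == lhs_keys.length

-- ===== PORT B =====
-- B-side helpers: _lhs_key is a single character pass over the text.
def pvTokensB : List (List Char) :=
  ["\\frac".toList, "\\sum".toList, "\\prod".toList, "\\int".toList, "+".toList, "-".toList, "=".toList]

def pvLhsKeyLoop : List Char → List Char → Option (List Char)
  | [], _ => none
  | c :: rest, lhs =>
    if PySem.Chars.isspace c then pvLhsKeyLoop rest lhs
    else
      let folded := PySem.Chars.lowerChar c      -- ch.casefold(), exact on ASCII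
      if folded = '=' then (if lhs = [] then none else some lhs)   -- "".join(lhs) or None
      else pvLhsKeyLoop rest (lhs ++ [folded])

def pvLhsKey (s : String) : Option (List Char) := pvLhsKeyLoop s.toList []

def pvBadKey (k : Option (List Char)) : Bool :=
  match k with
  | none => true
  | some key => pvTokensB.any (fun t => PySem.Chars.isIn t key)

def is_small_parameterized_definition_family_py_alt (run : List (List (String × String))) : Bool :=
  if run.length > 6 then false
  else
    let keys := run.map (fun item => pvLhsKey ((PySem.Dict.mk item).getD "text" ""))
    if keys.any pvBadKey then false
    else
      -- keys.sort(): at this point every key is a str; the unwrap getD [] is exact here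
      let ks := PySem.List.sorted (keys.map (fun k => k.getD [])) (fun x => x) false
      (ks.zip ks.tail).all (fun p => decide (p.1 < p.2))

-- ===== PRECONDITION & SPEC =====
-- Pre_ excludes exactly the inputs where item["text"] raises KeyError: some item lacks a "text"
-- key AND the run is short enough (≤ 6) for the comprehension to be reached at all.
def Pre_is_small_parameterized_definition_family_py (run : List (List (String × String))) : Prop :=
  6 < run.length ∨ (run.all (fun item => (PySem.Dict.mk item).contains "text")) = true
instance (run : List (List (String × String))) : Decidable (Pre_is_small_parameterized_definition_family_py run) := by unfold Pre_is_small_parameterized_definition_family_py; infer_instance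

def pvWitness_is_small_parameterized_definition_family_py : (List (List (String × String))) :=
  [[("text", "a=1")], [("text", "b = 2")]]

def Spec_is_small_parameterized_definition_family_py (run : List (List (String × String))) (out : Bool) : Prop := out = is_small_parameterized_definition_family_py_alt run
instance (run : List (List (String × String))) (out : Bool) : Decidable (Spec_is_small_parameterized_definition_family_py run out) := by unfold Spec_is_small_parameterized_definition_family_py; infer_instance

-- ===== CLAIM =====
def Claim_equal_is_small_parameterized_definition_family_py : Prop := ∀ (run : List (List (String × String))), Dom_is_small_parameterized_definition_family_py run → Pre_is_small_parameterized_definition_family_py run → Spec_is_small_parameterized_definition_family_py run (is_small_parameterized_definition_family_py run)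

-- ===== LEMMAS AND PROOFS =====

lemma isIn_single_eq_mem (n : List Char) : PySem.Chars.isIn ['='] n = true ↔ '=' ∈ n := by
  rw [PySem.Chars.isIn_iff_infix]; exact List.singleton_infix_iff _ _

-- B's one-pass key extraction equals A's normalize-then-split extraction
lemma pvLhsKeyLoop_eq (l : List Char) (acc : List Char) :
    pvLhsKeyLoop l acc =
      if '=' ∈ pvNormalize l then
        (if acc ++ (pvNormalize l).takeWhile (fun c => c ≠ '=') = [] then none
         else some (acc ++ (pvNormalize l).takeWhile (fun c => c ≠ '=')))
      else none := by
  induction l generalizing acc with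
  | nil => simp [pvLhsKeyLoop, pvNormalize]
  | cons c rest ih =>
    by_cases hs : PySem.Chars.isspace c = true
    · have hn : pvNormalize (c :: rest) = pvNormalize rest := by
        simp [pvNormalize, hs]
      rw [hn]
      simpa [pvLhsKeyLoop, hs] using ih acc
    · have hn : pvNormalize (c :: rest) = PySem.Chars.lowerChar c :: pvNormalize rest := by
        simp [pvNormalize, hs]
      rw [hn]
      by_cases he : PySem.Chars.lowerChar c = '='
      · simp [pvLhsKeyLoop, hs, he]
      · simp only [pvLhsKeyLoop, hs, Bool.false_eq_true, if_false, he]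
        rw [ih (acc ++ [PySem.Chars.lowerChar c])]
        simp [he, Ne.symm he, List.mem_cons]

lemma pvExtract_eq (s : String) : pvExtract s = pvLhsKey s := by
  unfold pvExtract pvLhsKey
  rw [pvLhsKeyLoop_eq]
  by_cases h : '=' ∈ pvNormalize s.toList
  · have : PySem.Chars.isIn ['='] (pvNormalize s.toList) = true := (isIn_single_eq_mem _).2 h
    simp [this, h]
  · have : PySem.Chars.isIn ['='] (pvNormalize s.toList) = false := by
      rw [Bool.eq_false_iff]
      intro ht
      exact h ((isIn_single_eq_mem _).1 ht)
    simp [this, h]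

lemma pvBadKey_some (s : List Char) : pvBadKey (some s) = pvForb s := rfl

-- B's single bad-key scan = A's two scans
lemma any_bad_eq (keys : List (Option (List Char))) :
    keys.any pvBadKey =
      (keys.any (fun k => k.isNone) ||
       keys.any (fun k => match k with | some s => pvForb s | none => false)) := by
  induction keys with
  | nil => rfl
  | cons k rest ih =>
    cases k with
    | none => simp [pvBadKey]
    | some s =>
      simp only [List.any_cons, ih, pvBadKey_some, Option.isNone_some]
      cases pvForb s <;> cases rest.any (fun k => k.isNone) <;> simp

-- A's set-size uniqueness test, characterised
lemma ofList_length_iff (keys : List (Option (List Char))) :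
    (PySem.Set.ofList keys).length = keys.length ↔ keys.Nodup := by
  have hperm : (PySem.Set.ofList keys).Perm keys.dedup := by
    refine (List.perm_ext_iff_of_nodup (PySem.Set.nodup_ofList keys) (List.nodup_dedup keys)).mpr ?_
    intro a; rw [PySem.Set.mem_ofList, List.mem_dedup]
  rw [hperm.length_eq]
  constructor
  · intro h
    have := List.Sublist.eq_of_length (List.dedup_sublist keys) h
    exact this ▸ List.nodup_dedup keys
  · intro h
    rw [List.dedup_eq_self.2 h]

-- adjacent zip-tail scan = chain
lemma allZip_iff_isChain (ks : List (List Char)) :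
    ((ks.zip ks.tail).all (fun p => decide (p.1 < p.2)) = true) ↔ List.IsChain (· < ·) ks := by
  induction ks with
  | nil => simp
  | cons a t ih =>
    cases t with
    | nil => simp
    | cons b t' =>
      simp only [List.tail_cons, List.zip_cons_cons, List.all_cons, Bool.and_eq_true,
        decide_eq_true_eq, List.isChain_cons_cons]
      rw [← ih]
      simp

-- unwrapping an all-some list of keys
lemma map_getD_some (keys : List (Option (List Char)))
    (h : ∀ k ∈ keys, k.isNone = false) :
    (keys.map (fun k => k.getD [])).map some = keys := by
  induction keys with
  | nil => rfl
  | cons k rest ih =>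
    cases k with
    | none => exact absurd (h none (by simp)) (by simp)
    | some s =>
      simp only [List.map_cons, Option.getD_some, List.cons.injEq, true_and]
      exact ih (fun k hk => h k (List.mem_cons_of_mem _ hk))

-- B's sorted-adjacency test decides Nodup
lemma sortedAdj_iff_nodup (ss : List (List Char)) :
    (((PySem.List.sorted ss (fun x => x) false).zip
        (PySem.List.sorted ss (fun x => x) false).tail).all
      (fun p => decide (p.1 < p.2)) = true) ↔ ss.Nodup := by
  have hperm : (PySem.List.sorted ss (fun x => x) false).Perm ss :=
    PySem.List.sorted_perm ss (fun x => x) false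
  -- sorted_pairwise is stated with the LinearOrder's decidability instance; align it (proof-irrelevant)
  have hle : List.Pairwise (fun a b => a ≤ b) (PySem.List.sorted ss (fun x => x) false) := by
    have h := PySem.List.sorted_pairwise (κ := List Char) ss (fun x => x)
    have hdec : (@LinearOrder.toDecidableLT _ List.instLinearOrder) =
        (fun a b : List Char => a.decidableLT b) :=
      funext fun a => funext fun b => Subsingleton.elim _ _
    rw [hdec] at h
    exact h
  rw [allZip_iff_isChain, List.isChain_iff_pairwise, ← hperm.nodup_iff]
  constructor
  · intro h
    exact List.Pairwise.imp (S := fun a b => a ≠ b) (fun hab => ne_of_lt hab) h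
  · intro h
    exact (hle.and h).imp (fun hab => lt_of_le_of_ne hab.1 hab.2)

-- ===== VERDICT =====
theorem is_small_parameterized_definition_family_py_spec : Claim_equal_is_small_parameterized_definition_family_py := by
  intro run _ _
  unfold Spec_is_small_parameterized_definition_family_py
  unfold is_small_parameterized_definition_family_py is_small_parameterized_definition_family_py_alt
  by_cases hlen : run.length > 6
  · rw [if_pos hlen, if_pos hlen]
  · rw [if_neg hlen, if_neg hlen]
    have hkeys : run.map (fun item => pvLhsKey ((PySem.Dict.mk item).getD "text" "")) = pvKeys run := by
      unfold pvKeys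
      exact List.map_congr_left (fun item _ => (pvExtract_eq _).symm)
    rw [hkeys]
    simp only [any_bad_eq (pvKeys run)]
    by_cases h1 : (pvKeys run).any (fun k => k.isNone) = true
    · simp [h1]
    · by_cases h2 : (pvKeys run).any (fun k => match k with | some s => pvForb s | none => false) = true
      · simp [h1, h2]
      · simp only [h1, h2, Bool.or_self, Bool.false_eq_true, if_false]
        have hnone : ∀ k ∈ pvKeys run, k.isNone = false := by
          intro k hk
          rw [Bool.eq_false_iff]
          intro ht
          exact h1 (List.any_eq_true.2 ⟨k, hk, ht⟩)
        apply Bool.coe_iff_coe.1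
        rw [beq_iff_eq, ofList_length_iff, sortedAdj_iff_nodup]
        conv_lhs => rw [← map_getD_some (pvKeys run) hnone]
        rw [List.nodup_map_iff (Option.some_injective _)]
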